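-- pv_equiv track=rewrite | github.com/evaarakchieva/yandex-algorithms-trainings-5 | 4_bin_search/raport.py | determine_opt_width
-- ===== SOURCE A (Python) =====
-- def determine_height(width, array):
--     height, l = 0, 0
--     for i in array:
--         if l != 0:
--             if l + i <= width - 1:
--                 l += i + 1
--             else:
--                 l = i
--                 height += 1
--         elif i < width:
--             l = i
--             height += 1
--         elif i == width:
--             height += 1
--             l = 0
--     return height
--
-- def determine_opt_width(h, array):
--     width_range = range(max(array), sum(array) + len(array) + 1)
--     left, right = 0, len(width_range) - 1
--     ind = -1
--     while left <= right:
--         mid = (left + right) // 2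
--         if determine_height(width_range[mid], array) <= h:
--             ind = mid
--             right = mid - 1
--         else:
--             left = mid + 1
--     if ind != -1:
--         opt = width_range[ind]
--         return opt
-- ===== SOURCE B (Python) =====
-- def determine_height(width, array):
--     height, l = 0, 0
--     for i in array:
--         if l == 0 and i > width:
--             continue
--         if l != 0 and l + i < width:
--             l += i + 1
--         else:
--             height += 1
--             l = 0 if (l == 0 and i == width) else i
--     return height
--
--
-- def determine_opt_width(h, array):
--     def search(lo, hi):
--         if lo > hi:
--             return None
--         mid = (lo + hi) // 2
--         if determine_height(mid, array) <= h:
--             found = search(lo, mid - 1)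
--             return mid if found is None else found
--         return search(mid + 1, hi)
--
--     return search(max(array), sum(array) + len(array))
-- ===== Notes on version B (the rewrite author's own statement) =====
-- stated objective: alternative
-- what changed: The iterative sentinel-based binary search over range indices (ind=-1, left/right over len(range)) is replaced by a self-contained recursive search directly over widths returning None/width via an Option-style combination, and determine_height's four-way branch nest is collapsed to a three-case step.
import Mathlib
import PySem

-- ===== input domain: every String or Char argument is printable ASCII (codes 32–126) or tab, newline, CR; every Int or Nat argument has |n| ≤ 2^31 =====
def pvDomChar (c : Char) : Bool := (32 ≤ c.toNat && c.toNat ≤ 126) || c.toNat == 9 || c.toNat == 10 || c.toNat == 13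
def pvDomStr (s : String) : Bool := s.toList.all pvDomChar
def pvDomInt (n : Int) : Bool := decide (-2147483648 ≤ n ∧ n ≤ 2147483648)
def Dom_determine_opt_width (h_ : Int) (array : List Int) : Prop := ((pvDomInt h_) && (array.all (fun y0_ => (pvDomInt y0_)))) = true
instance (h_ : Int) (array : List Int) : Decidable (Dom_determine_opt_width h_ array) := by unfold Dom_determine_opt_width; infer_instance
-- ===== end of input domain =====

-- B replaces A's sentinel-based iterative binary search over range indices by a recursive
-- search directly over widths returning an Option (objective: alternative; same probe sequence is proved, not assumed).

-- ===== PORT A =====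
-- determine_height of Source A, literal loop over (height, l)
def pvHeightA (width : Int) : List Int → Int → Int → Int
  | [], height, _ => height
  | i :: rest, height, l =>
    if l ≠ 0 then
      if l + i ≤ width - 1 then pvHeightA width rest height (l + i + 1)
      else pvHeightA width rest (height + 1) i
    else if i < width then pvHeightA width rest (height + 1) i
    else if i = width then pvHeightA width rest (height + 1) 0
    else pvHeightA width rest height l

-- the while-loop of determine_opt_width; width_range[mid] = lo + mid (range start lo, step 1;
-- mid is always a valid index when probed, so the arithmetic form is exact)
def pvBsearchA (h_ : Int) (array : List Int) (lo : Int) (left right ind : Int) : Int :=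
  if _hlr : left ≤ right then
    let mid := PySem.Int.floordiv (left + right) 2
    if pvHeightA (lo + mid) array 0 0 ≤ h_ then pvBsearchA h_ array lo left (mid - 1) mid
    else pvBsearchA h_ array lo (mid + 1) right ind
  else ind
termination_by (right + 1 - left).toNat
decreasing_by
  all_goals
    simp only [PySem.Int.floordiv_eq_ediv_of_pos (by norm_num : (0:Int) < 2)] at *
    omega

def determine_opt_width (h_ : Int) (array : List Int) : Option Int :=
  match PySem.List.max? array (fun x => x) with
  | none => none  -- max([]) raises ValueError in Python; excluded by Pre_
  | some lo =>
    -- len(width_range) for range(lo, sum+len+1)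
    let n : Int := max (array.sum + (array.length : Int) + 1 - lo) 0
    let ind := pvBsearchA h_ array lo 0 (n - 1) (-1)
    if ind ≠ -1 then some (lo + ind) else none

-- ===== PORT B =====
-- determine_height of Source B: one fold with a three-case step
def pvHeightBStep (width : Int) (s : Int × Int) (i : Int) : Int × Int :=
  if s.2 = 0 ∧ i > width then s
  else if s.2 ≠ 0 ∧ s.2 + i < width then (s.1, s.2 + i + 1)
  else (s.1 + 1, if s.2 = 0 ∧ i = width then 0 else i)

def pvHeightB (width : Int) (array : List Int) : Int :=
  (array.foldl (pvHeightBStep width) (0, 0)).1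

-- the recursive search of Source B, directly over widths
def pvSearchB (h_ : Int) (array : List Int) (lo hi : Int) : Option Int :=
  if _hlh : lo > hi then none
  else
    let mid := PySem.Int.floordiv (lo + hi) 2
    if pvHeightB mid array ≤ h_ then
      match pvSearchB h_ array lo (mid - 1) with
      | none => some mid
      | some w => some w
    else pvSearchB h_ array (mid + 1) hi
termination_by (hi + 1 - lo).toNat
decreasing_by
  all_goals
    simp only [PySem.Int.floordiv_eq_ediv_of_pos (by norm_num : (0:Int) < 2)] at *
    omega

def determine_opt_width_alt (h_ : Int) (array : List Int) : Option Int :=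
  match PySem.List.max? array (fun x => x) with
  | none => none  -- max([]) raises ValueError in Source B as well; excluded by Pre_
  | some lo => pvSearchB h_ array lo (array.sum + (array.length : Int))

-- ===== PRECONDITION & SPEC =====
-- Pre_ excludes only the empty list, on which both Pythons raise ValueError at max(array).
def Pre_determine_opt_width (h_ : Int) (array : List Int) : Prop := array ≠ []
instance (h_ : Int) (array : List Int) : Decidable (Pre_determine_opt_width h_ array) := by
  unfold Pre_determine_opt_width; infer_instance

def pvWitness_determine_opt_width : Int × List Int := (2, [3, 1, 2])

def Spec_determine_opt_width (h_ : Int) (array : List Int) (out : Option Int) : Prop := out = determine_opt_width_alt h_ array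
instance (h_ : Int) (array : List Int) (out : Option Int) : Decidable (Spec_determine_opt_width h_ array out) := by unfold Spec_determine_opt_width; infer_instance

-- ===== CLAIM (what is proved, stated in full; the proofs are below) =====
def Claim_equal_determine_opt_width : Prop := ∀ (h_ : Int) (array : List Int), Dom_determine_opt_width h_ array → Pre_determine_opt_width h_ array → Spec_determine_opt_width h_ array (determine_opt_width h_ array)

-- ===== LEMMAS AND PROOFS =====

-- B's folded three-case height step computes A's four-way branch loop
theorem pvHeight_eq (width : Int) (xs : List Int) :
    ∀ (h l : Int), (xs.foldl (pvHeightBStep width) (h, l)).1 = pvHeightA width xs h l := by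
  induction xs with
  | nil => intro h l; rfl
  | cons i rest ih =>
    intro h l
    show (rest.foldl (pvHeightBStep width) (pvHeightBStep width (h, l) i)).1 = _
    rw [show pvHeightBStep width (h, l) i =
        ((pvHeightBStep width (h, l) i).1, (pvHeightBStep width (h, l) i).2) from rfl, ih]
    simp only [pvHeightA, pvHeightBStep]
    split_ifs <;> first | rfl | omega

-- the iterative sentinel loop of A and the recursive Option search of B agree on every
-- (left, right, ind) state with 0 ≤ left, for the same height predicate
theorem pvHeightB_eq (w : Int) (xs : List Int) : pvHeightB w xs = pvHeightA w xs 0 0 :=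
  pvHeight_eq w xs 0 0

theorem pvLoop_eq (h_ : Int) (array : List Int) (lo : Int) :
    ∀ (n : Nat) (left right ind : Int), (right + 1 - left).toNat ≤ n → 0 ≤ left →
      (match pvSearchB h_ array (lo + left) (lo + right) with
       | some w => some w
       | none => if ind = -1 then none else some (lo + ind))
      = (if pvBsearchA h_ array lo left right ind ≠ -1
         then some (lo + pvBsearchA h_ array lo left right ind) else none) := by
  intro n
  induction n with
  | zero =>
    intro left right ind hn hl
    have hlr : ¬ left ≤ right := by omega
    rw [pvSearchB, pvBsearchA]
    rw [dif_pos (by omega : lo + left > lo + right), dif_neg hlr]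
    by_cases hi : ind = -1 <;> simp [hi]
  | succ n ih =>
    intro left right ind hn hl
    by_cases hlr : left ≤ right
    case neg =>
      rw [pvSearchB, pvBsearchA]
      rw [dif_pos (by omega : lo + left > lo + right), dif_neg hlr]
      by_cases hi : ind = -1 <;> simp [hi]
    case pos =>
      rw [pvSearchB, pvBsearchA, dif_neg (by omega : ¬ lo + left > lo + right), dif_pos hlr]
      have h2 : (0:Int) < 2 := by norm_num
      have hmidw : PySem.Int.floordiv (lo + left + (lo + right)) 2
          = lo + PySem.Int.floordiv (left + right) 2 := by
        rw [PySem.Int.floordiv_eq_ediv_of_pos h2, PySem.Int.floordiv_eq_ediv_of_pos h2]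
        omega
      set mid := PySem.Int.floordiv (left + right) 2 with hmiddef
      have hmb : left ≤ mid ∧ mid ≤ right := by
        rw [hmiddef, PySem.Int.floordiv_eq_ediv_of_pos h2]; omega
      simp only [hmidw, pvHeightB_eq]
      by_cases hp : pvHeightA (lo + mid) array 0 0 ≤ h_
      · rw [if_pos hp, if_pos hp]
        have IH := ih left (mid - 1) mid (by omega) hl
        rw [show lo + mid - 1 = lo + (mid - 1) by ring]
        cases hin : pvSearchB h_ array (lo + left) (lo + (mid - 1)) with
        | none =>
          rw [hin] at IH
          simp only [show mid ≠ -1 by omega] at IH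
          simpa using IH
        | some w =>
          rw [hin] at IH
          simpa using IH
      · rw [if_neg hp, if_neg hp]
        have IH := ih (mid + 1) right ind (by omega) (by omega)
        rw [show lo + mid + 1 = lo + (mid + 1) by ring]
        exact IH

-- ===== VERDICT (by name: the statement is the Claim_ definition above) =====
theorem determine_opt_width_spec : Claim_equal_determine_opt_width := by
  intro h_ array _hdom hpre
  unfold Spec_determine_opt_width
  unfold Pre_determine_opt_width at hpre
  obtain ⟨lo, hmax⟩ : ∃ lo, PySem.List.max? array (fun x => x) = some lo := by
    cases hx : PySem.List.max? array (fun x => x) with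
    | none => rw [PySem.List.max?_eq_none_iff] at hx; exact absurd hx hpre
    | some lo => exact ⟨lo, rfl⟩
  simp only [determine_opt_width, determine_opt_width_alt, hmax]
  set S : Int := array.sum + (array.length : Int) with hS
  by_cases hc : lo ≤ S + 1
  · have hn : max (S + 1 - lo) 0 = S + 1 - lo := by omega
    have key := pvLoop_eq h_ array lo (S + 1 - lo - 1 + 1 - 0).toNat 0 (S + 1 - lo - 1) (-1)
      (le_refl _) (le_refl 0)
    rw [show lo + (0:Int) = lo by ring, show lo + (S + 1 - lo - 1) = S by ring] at key
    rw [hn]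
    by_cases hz : pvBsearchA h_ array lo 0 (S + 1 - lo - 1) (-1) = -1
    · rw [if_neg (show ¬ (pvBsearchA h_ array lo 0 (S + 1 - lo - 1) (-1) ≠ -1) by omega)]
      cases hin : pvSearchB h_ array lo S with
      | none => rfl
      | some w => rw [hin] at key; simp [hz] at key
    · rw [if_pos hz] at key
      rw [if_pos hz]
      cases hin : pvSearchB h_ array lo S with
      | none => rw [hin] at key; simp at key
      | some w => rw [hin] at key; exact key.symm
  · have hn : max (S + 1 - lo) 0 = 0 := by omega
    rw [hn]
    rw [show pvBsearchA h_ array lo 0 (0 - 1) (-1) = -1 by rw [pvBsearchA]; simp]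
    rw [show pvSearchB h_ array lo S = none by rw [pvSearchB]; rw [dif_pos (by omega)]]
    simp
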